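-- pv_equiv track=rewrite | github.com/kharelutsav/infoDevAssesment | intervals_between_identical_elements.py | intervals_between_identical_elements
-- ===== SOURCE A (Python) =====
-- def intervals_between_identical_elements(arr): #Argument type: list, Return type: list
--     """
--     Function takes in array as argument and finds the difference between sum of the
--     absolute difference of index of the identical elements. The intervals sum for
--     every element is inserted(in this case appended) at the same index in a newly
--     created local list called new_arr.
--     On completion of iteration and logic, the function returns the new_arr list.
--
--     """
--     # Creates new local variable new_arr every time function is called and assigns it
--     # with an empty list.
--     new_arr = []
--
--     # Using for loop, iterate over the maximum length of for loop.
--     for i in range(len(arr)):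
--
--         # Create and assign local variable sum
--         sum = 0
--
--         # Re-iterates over length of array to find other identical elements in list.
--         for j in range(len(arr)):
--             # Logic to check if the number at j index is same as in i index.
--             # If True: add(sum, abs(i-j))
--             if arr[i] == arr[j]: sum += abs(i - j)
--
--         # Append the new sum at the index i
--         new_arr.append(sum)
--
--     # Returns local variable new_arr (i.e list containing intervals between identical elements)
--     return new_arr
-- ===== SOURCE B (Python) =====
-- def intervals_between_identical_elements(arr):
--     # O(n): two dict-aggregate passes (count, index-sum per value) replace the inner scan.
--     n = len(arr)
--     stats = {}
--     left = []
--     for i in range(n):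
--         c, s = stats.get(arr[i], (0, 0))
--         left.append(c * i - s)
--         stats[arr[i]] = (c + 1, s + i)
--     stats = {}
--     right = []
--     for i in range(n - 1, -1, -1):
--         c, s = stats.get(arr[i], (0, 0))
--         right.append(s - c * i)
--         stats[arr[i]] = (c + 1, s + i)
--     right.reverse()
--     return [a + b for a, b in zip(left, right)]
-- ===== Notes on version B (the rewrite author's own statement) =====
-- stated objective: faster
-- what changed: Replaced the nested O(n^2) scan with two linear passes that keep per-value (count, index-sum) aggregates in a dict, so each index's distance sum is a closed formula c*i-s (left) plus s-c*i (right).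
import Mathlib
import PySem

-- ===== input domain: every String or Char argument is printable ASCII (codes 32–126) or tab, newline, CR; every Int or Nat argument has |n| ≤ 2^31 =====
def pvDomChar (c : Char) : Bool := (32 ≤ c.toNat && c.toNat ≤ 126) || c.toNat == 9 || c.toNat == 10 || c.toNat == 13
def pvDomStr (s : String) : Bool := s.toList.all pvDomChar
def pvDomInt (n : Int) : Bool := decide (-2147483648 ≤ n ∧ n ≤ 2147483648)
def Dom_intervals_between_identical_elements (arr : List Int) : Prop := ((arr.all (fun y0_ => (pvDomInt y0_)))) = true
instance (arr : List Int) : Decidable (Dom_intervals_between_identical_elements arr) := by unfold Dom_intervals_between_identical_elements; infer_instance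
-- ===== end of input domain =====

-- B replaces A's nested quadratic scan by two linear passes keeping per-value
-- (count, index-sum) aggregates in a dict; proved to return the same list on every input.

-- ===== PORT A =====
def intervals_between_identical_elements (arr : List Int) : List Int :=
  (PySem.List.pyRange 0 (PySem.List.len arr) 1).foldl
    (fun new_arr i =>
      new_arr ++
        [(PySem.List.pyRange 0 (PySem.List.len arr) 1).foldl
          (fun sum j =>
            if PySem.List.pyGetD arr i 0 = PySem.List.pyGetD arr j 0 then sum + |i - j| else sum)
          0])
    []

-- ===== PORT B =====
def intervals_between_identical_elements_alt (arr : List Int) : List Int :=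
  let n := PySem.List.len arr
  let fwd := (PySem.List.pyRange 0 n 1).foldl
      (fun (st : PySem.Dict Int (Int × Int) × List Int) i =>
        let p := st.1.getD (PySem.List.pyGetD arr i 0) (0, 0)
        (st.1.insert (PySem.List.pyGetD arr i 0) (p.1 + 1, p.2 + i), st.2 ++ [p.1 * i - p.2]))
      (PySem.Dict.empty, [])
  let bwd := (PySem.List.pyRange (n - 1) (-1) (-1)).foldl
      (fun (st : PySem.Dict Int (Int × Int) × List Int) i =>
        let p := st.1.getD (PySem.List.pyGetD arr i 0) (0, 0)
        (st.1.insert (PySem.List.pyGetD arr i 0) (p.1 + 1, p.2 + i), st.2 ++ [p.2 - p.1 * i]))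
      (PySem.Dict.empty, [])
  (fwd.2.zip bwd.2.reverse).map (fun q => q.1 + q.2)

-- ===== PRECONDITION & SPEC =====
def Spec_intervals_between_identical_elements (arr : List Int) (out : List Int) : Prop := out = intervals_between_identical_elements_alt arr
instance (arr : List Int) (out : List Int) : Decidable (Spec_intervals_between_identical_elements arr out) := by unfold Spec_intervals_between_identical_elements; infer_instance

-- ===== CLAIM (what is proved, stated in full; the proofs are below) =====
def Claim_equal_intervals_between_identical_elements : Prop := ∀ (arr : List Int), Dom_intervals_between_identical_elements arr → Spec_intervals_between_identical_elements arr (intervals_between_identical_elements arr)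

-- ===== LEMMAS AND PROOFS =====

-- pure model of one dict pass of B: at each index, formula h is applied to the current
-- (count, index-sum) aggregate of that index's value, then the aggregate is updated
def pvPassOut (val : Int → Int) (h : Int → Int → Int → Int) (st : Int → Int × Int) : List Int → List Int
  | [] => []
  | i :: rest =>
      h (st (val i)).1 (st (val i)).2 i ::
        pvPassOut val h (fun v => if val i == v then ((st (val i)).1 + 1, (st (val i)).2 + i) else st v) rest

-- the aggregate map after a pass over l
def pvStatsAfter (val : Int → Int) (st : Int → Int × Int) : List Int → (Int → Int × Int)
  | [] => st
  | i :: rest =>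
      pvStatsAfter val (fun v => if val i == v then ((st (val i)).1 + 1, (st (val i)).2 + i) else st v) rest

-- each dict fold in port B computes pvPassOut (the dict realises the aggregate map st)
theorem pvPass_spec (val : Int → Int) (h : Int → Int → Int → Int) :
    ∀ (l : List Int) (d : PySem.Dict Int (Int × Int)) (acc : List Int) (st : Int → Int × Int),
      (∀ v, d.getD v (0, 0) = st v) →
      (l.foldl
        (fun (s : PySem.Dict Int (Int × Int) × List Int) i =>
          let p := s.1.getD (val i) (0, 0)
          (s.1.insert (val i) (p.1 + 1, p.2 + i), s.2 ++ [h p.1 p.2 i]))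
        (d, acc)).2 = acc ++ pvPassOut val h st l := by
  intro l
  induction l with
  | nil => intro d acc st hinv; simp [pvPassOut]
  | cons i rest ih =>
    intro d acc st hinv
    have hinv' : ∀ v,
        (d.insert (val i) ((d.getD (val i) (0, 0)).1 + 1, (d.getD (val i) (0, 0)).2 + i)).getD v (0, 0)
          = (fun v => if val i == v then ((st (val i)).1 + 1, (st (val i)).2 + i) else st v) v := by
      intro v
      by_cases hv : v = val i
      · subst hv
        rw [PySem.Dict.getD_insert_self, hinv (val i)]
        simp
      · rw [PySem.Dict.getD_insert_of_ne d _ _ hv]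
        have : (val i == v) = false := by simp [Ne.symm hv]
        simp [this, hinv v]
    simp only [List.foldl_cons, pvPassOut]
    rw [ih _ _ _ hinv', hinv (val i)]
    simp

theorem pvPassOut_append (val : Int → Int) (h : Int → Int → Int → Int) :
    ∀ (l1 l2 : List Int) (st : Int → Int × Int),
      pvPassOut val h st (l1 ++ l2) = pvPassOut val h st l1 ++ pvPassOut val h (pvStatsAfter val st l1) l2 := by
  intro l1
  induction l1 with
  | nil => intro l2 st; simp [pvPassOut, pvStatsAfter]
  | cons i rest ih =>
    intro l2 st
    simp only [List.cons_append, pvPassOut, pvStatsAfter, ih]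

theorem pvStatsAfter_eq (val : Int → Int) :
    ∀ (l : List Int) (st : Int → Int × Int) (v : Int),
      pvStatsAfter val st l v =
        ((st v).1 + ((l.filter (fun j => val j == v)).length : Int),
         (st v).2 + (l.filter (fun j => val j == v)).sum) := by
  intro l
  induction l with
  | nil => intro st v; simp [pvStatsAfter]
  | cons i rest ih =>
    intro st v
    simp only [pvStatsAfter, List.filter_cons, ih]
    by_cases hv : val i = v
    · subst hv
      simp
      constructor <;> ring
    · have hb : (val i == v) = false := by simp [hv]
      simp [hb]

-- closed forms of B's two per-index formulas
def pvL (arr : List Int) (i : Int) : Int :=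
  let f := (PySem.List.pyRange 0 i 1).filter
      (fun j => PySem.List.pyGetD arr j 0 == PySem.List.pyGetD arr i 0)
  (f.length : Int) * i - f.sum

def pvR (arr : List Int) (n i : Int) : Int :=
  let f := (PySem.List.pyRange (i + 1) n 1).filter
      (fun j => PySem.List.pyGetD arr j 0 == PySem.List.pyGetD arr i 0)
  f.sum - (f.length : Int) * i

theorem pvFwd_eq (arr : List Int) (n : Nat) :
    pvPassOut (fun j => PySem.List.pyGetD arr j 0) (fun c s i => c * i - s) (fun _ => (0, 0))
        (PySem.List.pyRange 0 n 1) =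
      (PySem.List.pyRange 0 n 1).map (pvL arr) := by
  induction n with
  | zero => simp [PySem.List.pyRange_one_eq_nil, pvPassOut]
  | succ m ih =>
    have hcast : ((m + 1 : Nat) : Int) = (m : Int) + 1 := by push_cast; ring
    rw [hcast, PySem.List.pyRange_one_succ_right (by positivity)]
    rw [pvPassOut_append, ih, List.map_append]
    congr 1
    simp only [pvPassOut, List.map_cons, List.map_nil]
    rw [pvStatsAfter_eq]
    simp [pvL]

theorem pvBwd_gen (arr : List Int) :
    ∀ (n : Nat) (st : Int → Int × Int),
      pvPassOut (fun j => PySem.List.pyGetD arr j 0) (fun c s i => s - c * i) st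
          ((PySem.List.pyRange 0 n 1).reverse) =
        ((PySem.List.pyRange 0 n 1).reverse).map (fun i =>
          ((st (PySem.List.pyGetD arr i 0)).2 +
              ((PySem.List.pyRange (i + 1) n 1).filter
                (fun j => PySem.List.pyGetD arr j 0 == PySem.List.pyGetD arr i 0)).sum) -
            ((st (PySem.List.pyGetD arr i 0)).1 +
              (((PySem.List.pyRange (i + 1) n 1).filter
                (fun j => PySem.List.pyGetD arr j 0 == PySem.List.pyGetD arr i 0)).length : Int)) * i) := by
  intro n
  induction n with
  | zero => intro st; simp [PySem.List.pyRange_one_eq_nil, pvPassOut]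
  | succ m ih =>
    intro st
    have hcast : ((m + 1 : Nat) : Int) = (m : Int) + 1 := by push_cast; ring
    rw [hcast, PySem.List.pyRange_one_succ_right (by positivity), List.reverse_append]
    simp only [List.reverse_cons, List.reverse_nil, List.nil_append, List.cons_append,
      List.nil_append]
    simp only [pvPassOut, List.map_cons]
    congr 1
    · rw [PySem.List.pyRange_one_eq_nil (le_refl _)]
      simp
    · rw [ih]
      apply List.map_congr_left
      intro i hi
      have him : i ∈ PySem.List.pyRange 0 (m : Int) 1 := List.mem_reverse.mp hi
      have hbnd := PySem.List.mem_pyRange_one.mp him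
      have hsplit : PySem.List.pyRange (i + 1) ((m : Int) + 1) 1
          = PySem.List.pyRange (i + 1) (m : Int) 1 ++ [(m : Int)] :=
        PySem.List.pyRange_one_succ_right (by omega)
      rw [hsplit, List.filter_append]
      simp only [List.filter_cons, List.filter_nil]
      by_cases hc : (PySem.List.pyGetD arr (m : Int) 0 == PySem.List.pyGetD arr i 0) = true
      · have heq : PySem.List.pyGetD arr (m : Int) 0 = PySem.List.pyGetD arr i 0 := by
          simpa using hc
        simp only [if_true, heq, List.sum_append, List.length_append, List.sum_cons,
          List.sum_nil, beq_self_eq_true, List.length_singleton]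
        push_cast
        ring
      · simp only [hc, Bool.not_eq_true] at *
        simp

theorem pvBwd_eq (arr : List Int) (n : Nat) :
    pvPassOut (fun j => PySem.List.pyGetD arr j 0) (fun c s i => s - c * i) (fun _ => (0, 0))
        ((PySem.List.pyRange 0 n 1).reverse) =
      ((PySem.List.pyRange 0 n 1).reverse).map (fun i => pvR arr n i) := by
  rw [pvBwd_gen]
  apply List.map_congr_left
  intro i _
  simp [pvR]

theorem pvA_eq_map (arr : List Int) :
    intervals_between_identical_elements arr =
      (PySem.List.pyRange 0 arr.length 1).map
        (fun i =>
          ((PySem.List.pyRange 0 arr.length 1).map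
            (fun j => if PySem.List.pyGetD arr i 0 = PySem.List.pyGetD arr j 0 then |i - j| else 0)).sum) := by
  unfold intervals_between_identical_elements
  rw [PySem.List.len_eq]
  rw [PySem.List.foldl_append_singleton_eq_map]
  simp only [List.nil_append]
  apply List.map_congr_left
  intro i _
  have : (fun (sum : Int) j =>
      if PySem.List.pyGetD arr i 0 = PySem.List.pyGetD arr j 0 then sum + |i - j| else sum)
      = fun (sum : Int) j => sum + (if PySem.List.pyGetD arr i 0 = PySem.List.pyGetD arr j 0 then |i - j| else 0) := by
    funext s j; split_ifs <;> simp
  rw [this, PySem.List.foldl_add]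
  simp

theorem pvSum_ite_filter (p : Int → Bool) (f : Int → Int) :
    ∀ (l : List Int), (l.map (fun j => if p j then f j else 0)).sum = ((l.filter p).map f).sum := by
  intro l
  induction l with
  | nil => simp
  | cons a l ih =>
    simp only [List.map_cons, List.sum_cons, List.filter_cons, ih]
    by_cases h : p a <;> simp [h]

theorem pvSum_sub_left (i : Int) : ∀ (l : List Int), (l.map (fun j => i - j)).sum = (l.length : Int) * i - l.sum := by
  intro l
  induction l with
  | nil => simp
  | cons a l ih => simp [ih]; ring

theorem pvSum_sub_right (i : Int) : ∀ (l : List Int), (l.map (fun j => j - i)).sum = l.sum - (l.length : Int) * i := by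
  intro l
  induction l with
  | nil => simp
  | cons a l ih => simp [ih]; ring

theorem pvPointwise (arr : List Int) (i : Int) (hi0 : 0 ≤ i) (hin : i < (arr.length : Int)) :
    ((PySem.List.pyRange 0 arr.length 1).map
      (fun j => if PySem.List.pyGetD arr i 0 = PySem.List.pyGetD arr j 0 then |i - j| else 0)).sum
      = pvL arr i + pvR arr arr.length i := by
  have hsplit : PySem.List.pyRange 0 arr.length 1
      = PySem.List.pyRange 0 i 1 ++ i :: PySem.List.pyRange (i + 1) arr.length 1 := by
    rw [PySem.List.pyRange_one_append 0 i arr.length hi0 (le_of_lt hin),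
        PySem.List.pyRange_one_cons hin]
  rw [hsplit]
  rw [List.map_append, List.sum_append, List.map_cons, List.sum_cons]
  have hmid : (if PySem.List.pyGetD arr i 0 = PySem.List.pyGetD arr i 0 then |i - i| else 0) = 0 := by
    simp
  rw [hmid]
  have hleft : ((PySem.List.pyRange 0 i 1).map
      (fun j => if PySem.List.pyGetD arr i 0 = PySem.List.pyGetD arr j 0 then |i - j| else 0)).sum
      = pvL arr i := by
    have hcongr : (PySem.List.pyRange 0 i 1).map
        (fun j => if PySem.List.pyGetD arr i 0 = PySem.List.pyGetD arr j 0 then |i - j| else 0)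
        = (PySem.List.pyRange 0 i 1).map
        (fun j => if (PySem.List.pyGetD arr j 0 == PySem.List.pyGetD arr i 0) then i - j else 0) := by
      apply List.map_congr_left
      intro j hj
      have hb : j < i := (PySem.List.mem_pyRange_one.mp hj).2
      have habs : |i - j| = i - j := abs_of_nonneg (by omega)
      by_cases he : PySem.List.pyGetD arr i 0 = PySem.List.pyGetD arr j 0
      · simp [he, habs]
      · have : (PySem.List.pyGetD arr j 0 == PySem.List.pyGetD arr i 0) = false := by
          simp; exact fun h => he h.symm
        simp [he, this]
    rw [hcongr, pvSum_ite_filter, pvSum_sub_left]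
    rfl
  have hright : ((PySem.List.pyRange (i + 1) arr.length 1).map
      (fun j => if PySem.List.pyGetD arr i 0 = PySem.List.pyGetD arr j 0 then |i - j| else 0)).sum
      = pvR arr arr.length i := by
    have hcongr : (PySem.List.pyRange (i + 1) arr.length 1).map
        (fun j => if PySem.List.pyGetD arr i 0 = PySem.List.pyGetD arr j 0 then |i - j| else 0)
        = (PySem.List.pyRange (i + 1) arr.length 1).map
        (fun j => if (PySem.List.pyGetD arr j 0 == PySem.List.pyGetD arr i 0) then j - i else 0) := by
      apply List.map_congr_left
      intro j hj
      have hb : i < j := by have := (PySem.List.mem_pyRange_one.mp hj).1; omega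
      have habs : |i - j| = j - i := by rw [abs_sub_comm]; exact abs_of_nonneg (by omega)
      by_cases he : PySem.List.pyGetD arr i 0 = PySem.List.pyGetD arr j 0
      · simp [he, habs]
      · have : (PySem.List.pyGetD arr j 0 == PySem.List.pyGetD arr i 0) = false := by
          simp; exact fun h => he h.symm
        simp [he, this]
    rw [hcongr, pvSum_ite_filter, pvSum_sub_right]
    rfl
  rw [hleft, hright]
  ring

theorem pvAlt_eq (arr : List Int) :
    intervals_between_identical_elements_alt arr =
      (PySem.List.pyRange 0 arr.length 1).map (fun i => pvL arr i + pvR arr arr.length i) := by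
  have hemp : ∀ v : Int,
      (PySem.Dict.empty : PySem.Dict Int (Int × Int)).getD v (0, 0) = (fun _ : Int => ((0 : Int), (0 : Int))) v := by
    intro v; exact PySem.Dict.getD_empty v (0, 0)
  simp only [intervals_between_identical_elements_alt, PySem.List.len_eq]
  have hrev : PySem.List.pyRange ((arr.length : Int) - 1) (-1) (-1)
      = (PySem.List.pyRange 0 (arr.length : Int) 1).reverse := by
    rw [PySem.List.pyRange_neg_one_eq_reverse]
    norm_num
  rw [hrev]
  rw [pvPass_spec (fun j => PySem.List.pyGetD arr j 0) (fun c s i => c * i - s) _ _ _ _ hemp]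
  rw [pvPass_spec (fun j => PySem.List.pyGetD arr j 0) (fun c s i => s - c * i) _ _ _ _ hemp]
  rw [List.nil_append, List.nil_append, pvFwd_eq, pvBwd_eq]
  rw [List.map_reverse, List.reverse_reverse, List.zip_map', List.map_map]
  rfl

-- ===== VERDICT (by name: the statement is the Claim_ definition above) =====
theorem intervals_between_identical_elements_spec : Claim_equal_intervals_between_identical_elements := by
  intro arr _
  unfold Spec_intervals_between_identical_elements
  rw [pvA_eq_map, pvAlt_eq]
  apply List.map_congr_left
  intro i hi
  have hb := PySem.List.mem_pyRange_one.mp hi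
  exact pvPointwise arr i hb.1 hb.2
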